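-- pv_equiv track=rewrite | github.com/sorryhyun/llgbm | dnd_repo/prepare/scripts/calculate_acc.py | match_option_by_keyword_count
-- ===== SOURCE A (Python) =====
-- def match_option_by_keyword_count(response: str, keywords: dict):
--     response_lower = response.lower()
--     option_counts = {}
--
--     for option, words in keywords.items():
--         count = 0
--         for word in words:
--             count += response_lower.count(word)
--         option_counts[option] = count
--
--     # return the choice that occurs most often
--     if option_counts and max(option_counts.values()) > 0:
--         return max(option_counts, key=option_counts.get)
--     return None
-- ===== SOURCE B (Python) =====
-- def match_option_by_keyword_count(response: str, keywords: dict):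
--     response_lower = response.lower()
--     best_option = None
--     best_count = 0
--     for option, words in keywords.items():
--         score = sum(response_lower.count(word) for word in words)
--         if score > best_count:
--             best_option, best_count = option, score
--     return best_option
-- ===== Notes on version B (the rewrite author's own statement) =====
-- stated objective: simpler
-- what changed: B drops the intermediate option_counts dict and the two subsequent max() passes, instead tracking the running best option and its count in a single pass over keywords.items(); the strict '>' against an initial 0 reproduces the positivity threshold and the first-key tie-break.
import Mathlib
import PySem

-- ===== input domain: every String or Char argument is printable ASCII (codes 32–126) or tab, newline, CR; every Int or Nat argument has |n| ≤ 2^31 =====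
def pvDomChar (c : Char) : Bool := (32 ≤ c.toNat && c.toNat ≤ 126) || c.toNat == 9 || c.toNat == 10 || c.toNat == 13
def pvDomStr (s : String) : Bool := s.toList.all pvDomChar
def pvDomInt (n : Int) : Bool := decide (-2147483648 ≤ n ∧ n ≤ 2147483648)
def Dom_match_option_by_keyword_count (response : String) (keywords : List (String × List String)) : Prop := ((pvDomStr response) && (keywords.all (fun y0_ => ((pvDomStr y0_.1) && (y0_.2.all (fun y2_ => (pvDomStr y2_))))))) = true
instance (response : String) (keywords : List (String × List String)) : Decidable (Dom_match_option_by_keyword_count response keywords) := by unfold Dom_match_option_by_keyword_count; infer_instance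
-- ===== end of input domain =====

-- B replaces A's option_counts dict plus two max() passes by a single running-best pass;
-- equal return value on every input (the dict parameter is read as the association list
-- collapsed by Python's dict construction, PySem.Dict.ofList).

-- ===== PORT A =====
-- keywords is a Python dict: iterating keywords.items() iterates (PySem.Dict.ofList keywords).items.
def match_option_by_keyword_count (response : String) (keywords : List (String × List String)) : Option String :=
  let response_lower := PySem.Str.lower response
  let option_counts : PySem.Dict String Int :=
    ((PySem.Dict.ofList keywords).items).foldl
      (fun d p =>
        d.insert p.1 (p.2.foldl (fun count word => count + (PySem.Str.count response_lower word : Int)) 0))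
      PySem.Dict.empty
  -- 'if option_counts and max(option_counts.values()) > 0': max? = none exactly when the dict is empty (falsy)
  match PySem.List.max? option_counts.values (fun v => v) with
  | none => none
  | some m =>
    if 0 < m then
      -- max(option_counts, key=option_counts.get): first key with maximal count (all keys present, so .get = value)
      PySem.List.max? option_counts.keys (fun k => option_counts.getD k 0)
    else none

-- ===== PORT B =====
def pvAltGo (response_lower : String) : List (String × List String) → Option String → Int → Option String
  | [], best_option, _ => best_option
  | (option, words) :: rest, best_option, best_count =>
    let score := (words.map (fun w => (PySem.Str.count response_lower w : Int))).sum
    if best_count < score then pvAltGo response_lower rest (some option) score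
    else pvAltGo response_lower rest best_option best_count

def match_option_by_keyword_count_alt (response : String) (keywords : List (String × List String)) : Option String :=
  pvAltGo (PySem.Str.lower response) (PySem.Dict.ofList keywords).items none 0

-- ===== PRECONDITION & SPEC =====
def Spec_match_option_by_keyword_count (response : String) (keywords : List (String × List String)) (out : Option String) : Prop := out = match_option_by_keyword_count_alt response keywords
instance (response : String) (keywords : List (String × List String)) (out : Option String) : Decidable (Spec_match_option_by_keyword_count response keywords out) := by unfold Spec_match_option_by_keyword_count; infer_instance

-- ===== CLAIM (what is proved, stated in full; the proofs are below) =====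
def Claim_equal_match_option_by_keyword_count : Prop := ∀ (response : String) (keywords : List (String × List String)), Dom_match_option_by_keyword_count response keywords → Spec_match_option_by_keyword_count response keywords (match_option_by_keyword_count response keywords)

-- ===== LEMMAS AND PROOFS =====

-- the step function of PySem.List.max? (Python max with key), named so folds over it can be reasoned about
def pvStep {α : Type} (key : α → Int) (acc : Option α) (x : α) : Option α :=
  match acc with
  | none => some x
  | some mm => if key mm < key x then some x else some mm

-- combining a running maximum with the maximum of the rest
def pvCmb {α : Type} (key : α → Int) (m : α) : Option α → Option α
  | none => some m
  | some m' => if key m < key m' then some m' else some m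

def pvScore (response_lower : String) (words : List String) : Int :=
  (words.map (fun w => (PySem.Str.count response_lower w : Int))).sum

-- selection made by B from the first maximal element (if any)
def pvPick (rl : String) (best : Option String) (c : Int) : Option (String × List String) → Option String
  | none => best
  | some m => if c < pvScore rl m.2 then some m.1 else best

theorem pv_max?_eq_foldl {α : Type} (key : α → Int) (l : List α) :
    PySem.List.max? l key = l.foldl (pvStep key) none := by
  unfold PySem.List.max?
  congr 1
  all_goals funext acc x
  all_goals cases acc <;> rfl

theorem pv_foldl_step_some {α : Type} (key : α → Int) (t : List α) (m : α) :
    t.foldl (pvStep key) (some m) = pvCmb key m (t.foldl (pvStep key) none) := by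
  induction t generalizing m with
  | nil => rfl
  | cons x t ih =>
    simp only [List.foldl_cons, pvStep]
    rcases hmt : t.foldl (pvStep key) none with _ | m'
    · by_cases h : key m < key x <;>
        simp only [h, if_true, if_false, ih, hmt, pvCmb] <;>
        first | rfl | (split_ifs <;> first | rfl | omega) | omega
    · by_cases h : key m < key x <;> by_cases h2 : key x < key m' <;>
        simp only [h, h2, if_true, if_false, ih, hmt, pvCmb] <;>
        first | rfl | (split_ifs <;> first | rfl | omega) | omega

theorem pv_foldl_step_map {α β : Type} (g : α → β) (key : β → Int) (l : List α) :
    ∀ acc : Option α,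
    (l.map g).foldl (pvStep key) (acc.map g)
      = Option.map g (l.foldl (pvStep (fun a => key (g a))) acc) := by
  induction l with
  | nil => intro acc; simp
  | cons x t ih =>
    intro acc
    rcases acc with _ | m
    · simpa using ih (some x)
    · simp only [Option.map_some, List.map_cons, List.foldl_cons, pvStep]
      by_cases h : key (g m) < key (g x) <;> simp only [h, if_true, if_false]
      · simpa using ih (some x)
      · simpa using ih (some m)

theorem pv_foldl_step_congr {α : Type} (k1 k2 : α → Int) (l : List α)
    (h : ∀ x ∈ l, k1 x = k2 x) :
    ∀ acc : Option α, (∀ m, acc = some m → k1 m = k2 m) →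
    l.foldl (pvStep k1) acc = l.foldl (pvStep k2) acc := by
  induction l with
  | nil => intro acc _; rfl
  | cons x t ih =>
    intro acc hacc
    have hx : k1 x = k2 x := h x (by simp)
    have ht : ∀ y ∈ t, k1 y = k2 y := fun y hy => h y (List.mem_cons_of_mem _ hy)
    rcases acc with _ | m
    · simp only [List.foldl_cons, pvStep]
      exact ih ht (some x) (by intro m' hm'; cases hm'; exact hx)
    · have hm : k1 m = k2 m := hacc m rfl
      simp only [List.foldl_cons, pvStep, hm, hx]
      split_ifs with hc
      · exact ih ht (some x) (by intro m' hm'; cases hm'; exact hx)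
      · exact ih ht (some m) (by intro m' hm'; cases hm'; exact hm)

theorem pv_go_eq (rl : String) (L : List (String × List String)) :
    ∀ (best : Option String) (c : Int),
    pvAltGo rl L best c = pvPick rl best c (L.foldl (pvStep (fun p => pvScore rl p.2)) none) := by
  induction L with
  | nil => intro best c; rfl
  | cons x t ih =>
    intro best c
    obtain ⟨option, words⟩ := x
    simp only [pvAltGo, List.foldl_cons, pvStep]
    rw [show ((words.map (fun w => (PySem.Str.count rl w : Int))).sum) = pvScore rl words from rfl]
    rcases ht : t.foldl (pvStep (fun p => pvScore rl p.2)) none with _ | m'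
    · by_cases hc : c < pvScore rl words <;>
        simp only [hc, if_true, if_false, ih, pv_foldl_step_some, ht, pvCmb, pvPick] <;>
        first | rfl | (split_ifs <;> first | rfl | omega) | omega
    · by_cases hc : c < pvScore rl words <;> by_cases h2 : pvScore rl words < pvScore rl m'.2 <;>
        simp only [hc, h2, if_true, if_false, ih, pv_foldl_step_some, ht, pvCmb, pvPick] <;>
        first | rfl | (split_ifs <;> first | rfl | omega) | omega

-- ===== VERDICT (by name: the statement is the Claim_ definition above) =====
theorem match_option_by_keyword_count_spec : Claim_equal_match_option_by_keyword_count := by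
  intro response keywords _
  unfold Spec_match_option_by_keyword_count
  unfold match_option_by_keyword_count match_option_by_keyword_count_alt
  dsimp only
  set rl := PySem.Str.lower response with hrl
  set L := (PySem.Dict.ofList keywords).items with hL
  have hkeys : (PySem.Dict.ofList keywords).keys = L.map Prod.fst := rfl
  have hnodup : (L.map Prod.fst).Nodup := by
    rw [← hkeys]; exact PySem.Dict.nodup_keys_ofList keywords
  have hval : ∀ p : String × List String,
      (p.2.foldl (fun count word => count + (PySem.Str.count rl word : Int)) 0) = pvScore rl p.2 := by
    intro p
    rw [PySem.List.foldl_add]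
    simp [pvScore]
  have hitems : (L.foldl
      (fun d p => d.insert p.1 (p.2.foldl (fun count word => count + (PySem.Str.count rl word : Int)) 0))
      PySem.Dict.empty).items = L.map (fun p => (p.1, pvScore rl p.2)) := by
    rw [PySem.Dict.items_foldl_insert_fresh L Prod.fst
      (fun p => p.2.foldl (fun count word => count + (PySem.Str.count rl word : Int)) 0)
      PySem.Dict.empty (fun a _ => PySem.Dict.contains_empty _) hnodup]
    rw [show (PySem.Dict.empty : PySem.Dict String Int).items = [] from rfl, List.nil_append]
    exact List.map_congr_left (fun p _ => by rw [hval p])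
  set oc := L.foldl
      (fun d p => d.insert p.1 (p.2.foldl (fun count word => count + (PySem.Str.count rl word : Int)) 0))
      PySem.Dict.empty with hoc
  have hvalues : oc.values = L.map (fun p => pvScore rl p.2) := by
    show oc.items.map Prod.snd = _
    rw [hitems, List.map_map]
    rfl
  have hkeys2 : oc.keys = L.map Prod.fst := by
    show oc.items.map Prod.fst = _
    rw [hitems, List.map_map]
    rfl
  have hocnodup : oc.keys.Nodup := by rw [hkeys2]; exact hnodup
  have hgetD : ∀ p ∈ L, oc.getD p.1 0 = pvScore rl p.2 := by
    intro p hp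
    exact PySem.Dict.getD_of_mem_items oc
      (by rw [hitems]; exact List.mem_map.mpr ⟨p, hp, rfl⟩) hocnodup 0
  have hA1 : PySem.List.max? oc.values (fun v => v)
      = Option.map (fun p => pvScore rl p.2) (L.foldl (pvStep (fun p => pvScore rl p.2)) none) := by
    rw [hvalues, pv_max?_eq_foldl]
    simpa using pv_foldl_step_map (fun p => pvScore rl p.2) (fun v => v) L none
  have hA2 : PySem.List.max? oc.keys (fun k => oc.getD k 0)
      = Option.map Prod.fst (L.foldl (pvStep (fun p => pvScore rl p.2)) none) := by
    rw [hkeys2, pv_max?_eq_foldl]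
    have hmp := pv_foldl_step_map Prod.fst (fun k => oc.getD k 0) L none
    have hcg := pv_foldl_step_congr (fun p => oc.getD p.1 0) (fun p => pvScore rl p.2) L hgetD none (by simp)
    simpa [hcg] using hmp
  rw [pv_go_eq rl L none 0]
  simp only [hA1, hA2]
  rcases hm : L.foldl (pvStep (fun p => pvScore rl p.2)) none with _ | m <;>
    simp only [hm, Option.map_none, Option.map_some, pvPick] <;>
    first | rfl | (split_ifs <;> rfl)
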